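-- pv_equiv track=rewrite | github.com/Ellana42/ign_scraping | parse_links.py | filter_recent
-- ===== SOURCE A (Python) =====
-- def filter_recent(link_dict):
--     for region, departments in link_dict.items():
--         list_dep = [dep for dep in departments]
--         list_dep.sort()
--         last_dep = list_dep[0]
--         for dep in list_dep[1:]:
--             if dep.split(' ')[0] == last_dep.split(' ')[0]:
--                 departments.pop(last_dep)
--             last_dep = dep
--     return link_dict
-- ===== SOURCE B (Python) =====
-- def filter_recent(link_dict):
--     # Different algorithm: no sort, no in-place mutation -- for each department key,
--     # find its strict successor (smallest strictly greater key) by a linear scan and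
--     # keep the key unless that successor shares its first space-token.
--     # (A mutates link_dict in place; B builds a new dict. Return values are equal.)
--     out = {}
--     for region, departments in link_dict.items():
--         keys = list(departments)
--         kept = {}
--         for dep, link in departments.items():
--             succ = None
--             for other in keys:
--                 if dep < other and (succ is None or other < succ):
--                     succ = other
--             if succ is None or succ.split(' ')[0] != dep.split(' ')[0]:
--                 kept[dep] = link
--         out[region] = kept
--     return out
-- ===== Notes on version B (the rewrite author's own statement) =====
-- stated objective: alternative
-- what changed: B replaces A's sort-then-adjacent-compare loop with in-place dict pops by a sortless successor scan: each key is kept iff the smallest strictly greater key does not share its first space-token, and the result dict is rebuilt instead of mutated.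
-- outside the precondition, e.g. on filter_recent({'r': {}}): A raises IndexError, B returns {'r': {}}
-- crash fix: On inputs where some region's department dict is empty (keys elsewhere unique), A raises IndexError on list_dep[0]; B returns the dict with that region kept empty. — e.g. on filter_recent([("r", [])]): A raises IndexError, B returns [("r", [])]
import Mathlib
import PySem

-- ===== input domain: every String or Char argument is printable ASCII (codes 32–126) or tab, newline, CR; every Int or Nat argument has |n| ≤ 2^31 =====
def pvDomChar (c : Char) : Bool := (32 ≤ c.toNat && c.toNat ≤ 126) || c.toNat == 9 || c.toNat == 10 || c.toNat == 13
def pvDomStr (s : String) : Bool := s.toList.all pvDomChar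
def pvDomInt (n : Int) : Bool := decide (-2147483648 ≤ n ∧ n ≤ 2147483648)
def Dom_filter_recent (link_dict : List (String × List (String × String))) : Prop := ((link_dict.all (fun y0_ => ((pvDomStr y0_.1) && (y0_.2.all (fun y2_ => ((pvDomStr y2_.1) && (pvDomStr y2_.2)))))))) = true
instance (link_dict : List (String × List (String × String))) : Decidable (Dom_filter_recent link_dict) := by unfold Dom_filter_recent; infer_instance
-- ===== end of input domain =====

-- B drops the sort and keeps a key iff its strict successor among the keys does not share its
-- first space-token; A mutates link_dict in place and returns it, B builds a new dict — the
-- equivalence proved here is about the RETURN value only.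

-- shared helper: dep.split(' ')[0]  (split? with a nonempty separator is always `some` of a
-- nonempty list, so the [0] never raises; the getD defaults are dead)
def pvTok (s : String) : String :=
  (PySem.List.pyGet? ((PySem.Str.split? s " ").getD []) 0).getD ""

-- ===== PORT A =====
def filter_recent (link_dict : List (String × List (String × String))) : List (String × List (String × String)) :=
  link_dict.map (fun rd =>
    let list_dep := rd.2.map Prod.fst                                -- [dep for dep in departments]
    let sorted_dep := PySem.List.sorted list_dep (fun x => x) false  -- list_dep.sort()
    match PySem.List.pyGet? sorted_dep 0 with
    | none => rd                                                     -- list_dep[0]: IndexError, excluded by Pre_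
    | some last0 =>
      (rd.1,
        ((PySem.List.slice sorted_dep (some 1) none).foldl           -- for dep in list_dep[1:]
          (fun st dep =>
            (if pvTok dep == pvTok st.2
             then st.1.eraseP (fun kv => kv.1 == st.2)               -- departments.pop(last_dep)
             else st.1,
             dep))                                                   -- last_dep = dep
          (rd.2, last0)).1))

-- ===== PORT B =====
-- successor scan: smallest key strictly greater than dep, none if there is none
def pvSucc (keys : List String) (dep : String) : Option String :=
  keys.foldl
    (fun succ other =>
      if dep < other && (match succ with | none => true | some s => decide (other < s))
      then some other else succ)
    none

def filter_recent_alt (link_dict : List (String × List (String × String))) : List (String × List (String × String)) :=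
  link_dict.map (fun rd =>
    let keys := rd.2.map Prod.fst
    (rd.1,
      rd.2.filter (fun kv =>
        match pvSucc keys kv.1 with
        | none => true
        | some s => !(pvTok s == pvTok kv.1))))

-- ===== PRECONDITION & SPEC =====
-- Pre_ excludes regions with an EMPTY department dict (A raises IndexError on list_dep[0]) and
-- duplicate department keys (impossible for a Python dict, where A's .pop could raise KeyError).
def Pre_filter_recent (link_dict : List (String × List (String × String))) : Prop :=
  ∀ p ∈ link_dict, p.2 ≠ [] ∧ (p.2.map Prod.fst).Nodup
instance (link_dict : List (String × List (String × String))) : Decidable (Pre_filter_recent link_dict) := by unfold Pre_filter_recent; infer_instance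

def pvWitness_filter_recent : (List (String × List (String × String))) :=
  [("r", [("a 2019", "x"), ("a 2020", "y"), ("b", "z")])]

-- A raises IndexError on any input containing a region with an empty department dict
-- (keys elsewhere unique, as in any Python dict); B returns the dict with that region kept empty.
def Raises_filter_recent (link_dict : List (String × List (String × String))) : Prop :=
  (∃ p ∈ link_dict, p.2 = []) ∧ ∀ p ∈ link_dict, (p.2.map Prod.fst).Nodup
instance (link_dict : List (String × List (String × String))) : Decidable (Raises_filter_recent link_dict) := by unfold Raises_filter_recent; infer_instance
def pvRaiseWitness_filter_recent : (List (String × List (String × String))) := [("r", [])]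
def pvRaiseWitnessOut_filter_recent : List (String × List (String × String)) := [("r", [])]

def Spec_filter_recent (link_dict : List (String × List (String × String))) (out : List (String × List (String × String))) : Prop := out = filter_recent_alt link_dict
instance (link_dict : List (String × List (String × String))) (out : List (String × List (String × String))) : Decidable (Spec_filter_recent link_dict out) := by unfold Spec_filter_recent; infer_instance

-- ===== CLAIM (what is proved, stated in full; the proofs are below) =====
def Claim_equal_filter_recent : Prop := ∀ (link_dict : List (String × List (String × String))), Dom_filter_recent link_dict → Pre_filter_recent link_dict → Spec_filter_recent link_dict (filter_recent link_dict)
def Claim_raises_filter_recent : Prop := (∀ (link_dict : List (String × List (String × String))), Dom_filter_recent link_dict → Raises_filter_recent link_dict → ¬ Pre_filter_recent link_dict) ∧ (Dom_filter_recent (pvRaiseWitness_filter_recent) ∧ Raises_filter_recent (pvRaiseWitness_filter_recent) ∧ filter_recent_alt (pvRaiseWitness_filter_recent) = pvRaiseWitnessOut_filter_recent)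

-- ===== LEMMAS AND PROOFS =====

-- the keys A pops: first components of adjacent sorted pairs sharing their first token
def pvAdjDoomed : List String → List String
  | a :: b :: t => (if pvTok b == pvTok a then [a] else []) ++ pvAdjDoomed (b :: t)
  | _ => []

lemma pvAdjDoomed_subset (s : List String) : ∀ x ∈ pvAdjDoomed s, x ∈ s := by
  match s with
  | [] => simp [pvAdjDoomed]
  | [a] => simp [pvAdjDoomed]
  | a :: b :: t =>
    intro x hx
    rw [pvAdjDoomed] at hx
    rcases List.mem_append.1 hx with h | h
    · split at h <;> simp_all
    · have := pvAdjDoomed_subset (b :: t) x h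
      simp_all

-- A's inner loop with its (dict, last_dep) state = folding pop over the doomed keys
lemma loopA_eq (t : List String) (d : List (String × String)) (a : String) :
    (t.foldl
      (fun st dep =>
        (if pvTok dep == pvTok st.2 then st.1.eraseP (fun kv => kv.1 == st.2) else st.1, dep))
      (d, a)).1
    = (pvAdjDoomed (a :: t)).foldl (fun d k => d.eraseP (fun kv => kv.1 == k)) d := by
  induction t generalizing d a with
  | nil => rfl
  | cons b t ih =>
    rw [List.foldl_cons, pvAdjDoomed, List.foldl_append]
    by_cases h : pvTok b == pvTok a <;>
      simp only [h, ite_true, ite_false, Bool.false_eq_true, List.foldl_cons, List.foldl_nil] <;>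
      exact ih _ b

lemma eraseP_eq_filter (d : List (String × String)) (k : String)
    (h : (d.map Prod.fst).Nodup) :
    d.eraseP (fun kv => kv.1 == k) = d.filter (fun kv => !(kv.1 == k)) := by
  induction d with
  | nil => rfl
  | cons kv d ih =>
    simp only [List.map_cons, List.nodup_cons] at h
    by_cases hk : kv.1 == k
    · have hfil : d.filter (fun kv' => !(kv'.1 == k)) = d := by
        apply List.filter_eq_self.2
        intro kv' hkv'
        have hne : kv'.1 ≠ k := by
          intro e
          apply h.1
          have : kv'.1 ∈ d.map Prod.fst := List.mem_map_of_mem hkv'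
          rwa [e, ← eq_of_beq hk] at this
        simp [hne]
      simp [hk, hfil]
    · simp [hk, ih h.2]

lemma foldl_erase_eq_filter (L : List String) (d : List (String × String))
    (h : (d.map Prod.fst).Nodup) :
    L.foldl (fun d k => d.eraseP (fun kv => kv.1 == k)) d
    = d.filter (fun kv => !(L.contains kv.1)) := by
  induction L generalizing d with
  | nil => simp
  | cons k L ih =>
    rw [List.foldl_cons]
    have hsub : ((d.eraseP (fun kv => kv.1 == k)).map Prod.fst).Nodup := by
      have : (d.eraseP (fun kv => kv.1 == k)).Sublist d := List.eraseP_sublist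
      exact (this.map Prod.fst).nodup h
    rw [ih _ hsub, eraseP_eq_filter _ _ h, List.filter_filter]
    apply List.filter_congr
    intro kv _
    simp only [List.contains_cons]
    cases hkk : kv.1 == k <;> simp

lemma pvSucc_go (l : List String) (k : String) (a : String) :
    l.foldl
      (fun succ other =>
        if k < other && (match succ with | none => true | some s => decide (other < s))
        then some other else succ)
      (some a)
    = some ((l.filter (fun o => decide (k < o))).foldl min a) := by
  induction l generalizing a with
  | nil => rfl
  | cons o l ih =>
    rw [List.foldl_cons, List.filter_cons]
    by_cases hko : k < o
    · by_cases hoa : o < a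
      · rw [if_pos (by simp [hko, hoa]), if_pos (by simp [hko]), ih o, List.foldl_cons,
          min_eq_right (le_of_lt hoa)]
      · rw [if_neg (by simp [hko, hoa]), if_pos (by simp [hko]), ih a, List.foldl_cons,
          min_eq_left (le_of_not_gt hoa)]
    · rw [if_neg (by simp [hko]), if_neg (by simp [hko]), ih a]

-- B's successor scan is the minimum of the strictly greater keys
lemma pvSucc_eq_min? (l : List String) (k : String) :
    pvSucc l k = (l.filter (fun o => decide (k < o))).min? := by
  unfold pvSucc
  induction l with
  | nil => rfl
  | cons o l ih =>
    rw [List.foldl_cons, List.filter_cons]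
    by_cases hko : k < o
    · simp only [hko, decide_true, Bool.true_and, ite_true]
      rw [pvSucc_go]
      rfl
    · simp only [hko, decide_false, Bool.false_and, Bool.false_eq_true, if_false, ih]

lemma min?_perm {l l' : List String} (h : l.Perm l') : l.min? = l'.min? := by
  cases hm : l.min? with
  | none =>
    rw [List.min?_eq_none_iff] at hm
    subst hm
    rw [← h.nil_eq]
    rfl
  | some a =>
    rw [List.min?_eq_some_iff] at hm
    exact (List.min?_eq_some_iff.2 ⟨h.mem_iff.1 hm.1, fun b hb => hm.2 b (h.mem_iff.2 hb)⟩).symm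

lemma foldl_min_of_le (t : List String) (b : String) (h : ∀ x ∈ t, b ≤ x) :
    t.foldl min b = b := by
  induction t with
  | nil => rfl
  | cons x t ih =>
    rw [List.foldl_cons, min_eq_left (h x (by simp))]
    exact ih (fun y hy => h y (by simp [hy]))

-- on a strictly sorted list, A pops k iff the smallest key above k shares its token
lemma pvAdjDoomed_mem_iff (s : List String) (hs : s.Pairwise (· < ·)) (k : String)
    (hk : k ∈ s) :
    k ∈ pvAdjDoomed s ↔
      ∃ b, (s.filter (fun o => decide (k < o))).min? = some b ∧ pvTok b = pvTok k := by
  induction s with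
  | nil => cases hk
  | cons a t ih =>
    match t with
    | [] =>
      have hka : k = a := by simpa using hk
      subst hka
      simp [pvAdjDoomed]
    | b :: t' =>
      have halt : ∀ x ∈ b :: t', a < x := (List.pairwise_cons.1 hs).1
      have ht : (b :: t').Pairwise (· < ·) := (List.pairwise_cons.1 hs).2
      rcases List.mem_cons.1 hk with hka | hkt
      · subst hka
        have hnotrec : k ∉ pvAdjDoomed (b :: t') := by
          intro hmem
          exact absurd (halt k (pvAdjDoomed_subset _ k hmem)) (lt_irrefl k)
        have hfil : (k :: b :: t').filter (fun o => decide (k < o)) = b :: t' := by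
          rw [List.filter_cons, List.filter_eq_self.2 (fun x hx => by simp [halt x hx])]
          simp
        rw [pvAdjDoomed, hfil]
        have hmin : (b :: t').min? = some b := by
          show some (t'.foldl min b) = some b
          rw [foldl_min_of_le t' b (fun x hx => le_of_lt ((List.pairwise_cons.1 ht).1 x hx))]
        constructor
        · intro hmem
          rcases List.mem_append.1 hmem with h | h
          · refine ⟨b, hmin, ?_⟩
            split at h <;> simp_all
          · exact absurd h hnotrec
        · rintro ⟨b', hb', htok⟩
          rw [hmin] at hb'
          obtain rfl : b = b' := by injection hb'
          apply List.mem_append.2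
          left
          simp [htok]
      · have hak : a < k := halt k hkt
        have hfil : (a :: b :: t').filter (fun o => decide (k < o))
            = (b :: t').filter (fun o => decide (k < o)) := by
          rw [List.filter_cons]
          simp [not_lt_of_gt hak]
        have hknota : k ∉ [a] := by
          simp
          intro e
          exact absurd hak (by rw [e]; exact lt_irrefl a)
        rw [pvAdjDoomed, hfil, ← ih ht hkt]
        constructor
        · intro hmem
          rcases List.mem_append.1 hmem with h | h
          · exact absurd (by split at h <;> simp_all) hknota
          · exact h
        · intro hmem
          exact List.mem_append.2 (Or.inr hmem)

-- the per-region equality: A's sort-and-pop loop = B's successor filter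
lemma region_eq (deps : List (String × String))
    (hnd : (deps.map Prod.fst).Nodup)
    (last0 : String) (rest : List String)
    (hs : PySem.List.sorted (deps.map Prod.fst) (fun x => x) false = last0 :: rest) :
    (rest.foldl
      (fun (st : List (String × String) × String) dep =>
        (if pvTok dep == pvTok st.2 then st.1.eraseP (fun kv => kv.1 == st.2) else st.1, dep))
      (deps, last0)).1
    = deps.filter (fun kv =>
        match pvSucc (deps.map Prod.fst) kv.1 with
        | none => true
        | some s => !(pvTok s == pvTok kv.1)) := by
  have hperm : (last0 :: rest).Perm (deps.map Prod.fst) := hs ▸ PySem.List.sorted_perm _ _ _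
  have hnds : (last0 :: rest).Nodup := hperm.nodup_iff.2 hnd
  have hle : (last0 :: rest).Pairwise (· ≤ ·) := by
    have := PySem.List.sorted_pairwise (xs := deps.map Prod.fst) (key := fun x => x)
    rwa [hs] at this
  have hlt : (last0 :: rest).Pairwise (· < ·) :=
    (hle.and hnds).imp (fun h => lt_of_le_of_ne h.1 h.2)
  rw [loopA_eq, ← hs, hs, foldl_erase_eq_filter _ _ hnd]
  apply List.filter_congr
  intro kv hkv
  have hk : kv.1 ∈ last0 :: rest := hperm.mem_iff.2 (List.mem_map_of_mem hkv)
  have hmemiff := pvAdjDoomed_mem_iff (last0 :: rest) hlt kv.1 hk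
  have hfperm : ((deps.map Prod.fst).filter (fun o => decide (kv.1 < o))).Perm
      ((last0 :: rest).filter (fun o => decide (kv.1 < o))) := hperm.symm.filter _
  rw [pvSucc_eq_min?, min?_perm hfperm]
  cases hmin : ((last0 :: rest).filter (fun o => decide (kv.1 < o))).min? with
  | none =>
    have hnotd : kv.1 ∉ pvAdjDoomed (last0 :: rest) := by
      intro hmem
      rcases hmemiff.1 hmem with ⟨b, hb, _⟩
      rw [hmin] at hb
      cases hb
    simp [hnotd]
  | some b =>
    by_cases htok : pvTok b = pvTok kv.1
    · have hd : kv.1 ∈ pvAdjDoomed (last0 :: rest) := hmemiff.2 ⟨b, hmin, htok⟩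
      simp [hd, htok]
    · have hnotd : kv.1 ∉ pvAdjDoomed (last0 :: rest) := by
        intro hmem
        rcases hmemiff.1 hmem with ⟨b', hb', htok'⟩
        rw [hmin] at hb'
        obtain rfl : b = b' := by injection hb'
        exact htok htok'
      simp [hnotd, htok]

-- ===== VERDICT (by name: the statement is the Claim_ definition above) =====
theorem filter_recent_spec : Claim_equal_filter_recent := by
  intro ld _ hpre
  unfold Spec_filter_recent filter_recent filter_recent_alt
  apply List.map_congr_left
  intro rd hrd
  obtain ⟨hne, hnd⟩ := hpre rd hrd
  have hmapne : rd.2.map Prod.fst ≠ [] := by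
    simpa using hne
  have hsne : PySem.List.sorted (rd.2.map Prod.fst) (fun x => x) false ≠ [] := by
    rw [ne_eq, PySem.List.sorted_eq_nil_iff]
    exact hmapne
  obtain ⟨last0, rest, hs⟩ := List.exists_cons_of_ne_nil hsne
  simp only [hs, PySem.List.pyGet?_zero_cons, PySem.List.slice_from_one, List.tail_cons]
  exact congrArg (Prod.mk rd.1) (region_eq rd.2 hnd last0 rest hs)

@[simp]
theorem filter_recent_raises : Claim_raises_filter_recent := by
  unfold Claim_raises_filter_recent
  exact ⟨fun ld _ h hpre => (hpre h.1.choose h.1.choose_spec.1).1 h.1.choose_spec.2, by decide⟩
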